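-- pv_equiv track=rewrite | github.com/Daayimm/t1-logic | largestInList.py | sumGreatThan
-- ===== SOURCE A (Python) =====
-- def sumGreatThan(lst,target):
--
--     total = 0
--     newLst = []
--
--     for i in range(len(lst)):
--         total += lst[i]
--         newLst.append(lst[i])
--         if total >= target:
--             break
--
--     return total,newLst
-- ===== SOURCE B (Python) =====
-- def sumGreatThan(lst, target):
--     # Phase 1: build the full prefix-sum table.
--     prefixes = []
--     s = 0
--     for x in lst:
--         s += x
--         prefixes.append(s)
--     # Phase 2: find the first index whose prefix sum reaches the target.
--     j = next((i for i, p in enumerate(prefixes) if p >= target), None)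
--     if j is not None:
--         return prefixes[j], lst[:j + 1]
--     if not prefixes:
--         return 0, []
--     return prefixes[-1], lst[:]
-- ===== Notes on version B (the rewrite author's own statement) =====
-- stated objective: alternative
-- what changed: Replaces A's single accumulate-and-break loop by a prefix-sum table built first, then a separate search for the first index reaching the target and a slice of the input.
import Mathlib
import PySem

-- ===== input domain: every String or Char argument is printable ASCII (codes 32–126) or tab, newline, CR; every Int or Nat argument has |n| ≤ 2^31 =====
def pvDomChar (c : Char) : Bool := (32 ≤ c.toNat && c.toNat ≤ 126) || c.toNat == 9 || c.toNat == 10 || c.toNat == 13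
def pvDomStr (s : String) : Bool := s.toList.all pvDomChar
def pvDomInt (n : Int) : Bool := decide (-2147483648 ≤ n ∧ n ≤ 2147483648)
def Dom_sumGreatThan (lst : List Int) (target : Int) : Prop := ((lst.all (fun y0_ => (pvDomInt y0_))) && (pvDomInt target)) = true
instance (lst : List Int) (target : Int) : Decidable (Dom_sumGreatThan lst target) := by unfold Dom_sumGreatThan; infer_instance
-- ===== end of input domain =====

-- B builds a prefix-sum table first, then searches it; same cost as A, different decomposition ("alternative").

-- ===== PORT A =====
-- A's for-loop over range(len(lst)) with running total, appended list and break: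
def pvGoA (target : Int) : List Int → Int → List Int → Int × List Int
  | [], total, newLst => (total, newLst)
  | x :: xs, total, newLst =>
      let total' := total + x
      let newLst' := newLst ++ [x]
      if target ≤ total' then (total', newLst') else pvGoA target xs total' newLst'

def sumGreatThan (lst : List Int) (target : Int) : Int × List Int :=
  pvGoA target lst 0 []

-- ===== PORT B =====
-- phase 1 of Source B: the prefix-sum table
def pvAccum : List Int → Int → List Int
  | [], _ => []
  | x :: xs, s => (s + x) :: pvAccum xs (s + x)

-- phase 2 of Source B: next((i for i,p in enumerate(prefixes) if p >= target), None)
def pvFind (target : Int) : List Int → Option Nat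
  | [] => none
  | p :: ps => if target ≤ p then some 0 else (pvFind target ps).map (· + 1)

def sumGreatThan_alt (lst : List Int) (target : Int) : Int × List Int :=
  let prefixes := pvAccum lst 0
  match pvFind target prefixes with
  | some j => (prefixes.getD j 0, lst.take (j + 1))
  | none => if prefixes = [] then (0, []) else (prefixes.getLastD 0, lst)

-- ===== PRECONDITION & SPEC =====
def Spec_sumGreatThan (lst : List Int) (target : Int) (out : Int × List Int) : Prop := out = sumGreatThan_alt lst target
instance (lst : List Int) (target : Int) (out : Int × List Int) : Decidable (Spec_sumGreatThan lst target out) := by unfold Spec_sumGreatThan; infer_instance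

-- ===== CLAIM (what is proved, stated in full; the proofs are below) =====
def Claim_equal_sumGreatThan : Prop := ∀ (lst : List Int) (target : Int), Dom_sumGreatThan lst target → Spec_sumGreatThan lst target (sumGreatThan lst target)

-- ===== LEMMAS AND PROOFS =====
lemma pvGoA_key (target : Int) : ∀ (lst : List Int) (s : Int) (acc : List Int),
    pvGoA target lst s acc =
      match pvFind target (pvAccum lst s) with
      | some j => ((pvAccum lst s).getD j 0, acc ++ lst.take (j + 1))
      | none => if lst = [] then (s, acc) else ((pvAccum lst s).getLastD 0, acc ++ lst)
  | [], s, acc => by simp [pvGoA, pvAccum, pvFind]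
  | x :: xs, s, acc => by
      simp only [pvGoA, pvAccum, pvFind]
      by_cases h : target ≤ s + x
      · simp [h]
      · simp only [if_neg h]
        rw [pvGoA_key target xs (s + x) (acc ++ [x])]
        cases hf : pvFind target (pvAccum xs (s + x)) with
        | some j => simp [Option.map, List.take_succ_cons]
        | none =>
            simp only [Option.map]
            cases xs with
            | nil => simp [pvAccum]
            | cons y ys => simp [pvAccum]

-- ===== VERDICT (by name: the statement is the Claim_ definition above) =====
theorem sumGreatThan_spec : Claim_equal_sumGreatThan := by
  intro lst target _
  unfold Spec_sumGreatThan sumGreatThan sumGreatThan_alt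
  rw [pvGoA_key]
  cases hf : pvFind target (pvAccum lst 0) with
  | some j => simp [hf]
  | none =>
      cases lst with
      | nil => simp [pvFind, pvAccum]
      | cons x xs =>
          simp only [pvAccum, zero_add] at hf
          simp [pvAccum, hf]
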